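-- pv_equiv track=rewrite | github.com/sam-packer/Sentinel | src/data/improved_labeler.py | _find_keyword_positions
-- ===== SOURCE A (Python) =====
-- def _find_keyword_positions(lowered: str, words: list[str], keywords: set[str]) -> list[int]:
--     """Find word indices where a keyword starts.
--
--     Handles multi-word keywords. Longer keywords take priority over
--     shorter ones at the same position to avoid double-counting.
--     """
--     positions = []
--     matched_indices: set[int] = set()
--     # Check longer keywords first so they take priority
--     sorted_keywords = sorted(keywords, key=lambda k: len(k.split()), reverse=True)
--     for kw in sorted_keywords:
--         kw_words = kw.split()
--         kw_len = len(kw_words)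
--         for i in range(len(words) - kw_len + 1):
--             if i in matched_indices:
--                 continue
--             candidate = " ".join(words[i:i + kw_len])
--             if candidate == kw:
--                 positions.append(i)
--                 for j in range(i, i + kw_len):
--                     matched_indices.add(j)
--     return positions
-- ===== SOURCE B (Python) =====
-- def _find_keyword_positions(lowered: str, words: list[str], keywords: set[str]) -> list[int]:
--     """Find word indices where a keyword starts (inverted-index version).
--
--     Pre-builds, once per distinct keyword word-count L, a hash index from the
--     joined L-word window to its ascending start positions; each keyword then
--     only visits its own occurrences instead of scanning every position.
--     """
--     index: dict[int, dict[str, list[int]]] = {}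
--     for kw in keywords:
--         L = len(kw.split())
--         if L not in index:
--             idx: dict[str, list[int]] = {}
--             for i in range(len(words) - L + 1):
--                 idx.setdefault(" ".join(words[i:i + L]), []).append(i)
--             index[L] = idx
--     positions = []
--     matched: set[int] = set()
--     for kw in sorted(keywords, key=lambda k: len(k.split()), reverse=True):
--         L = len(kw.split())
--         for i in index[L].get(kw, []):
--             if i not in matched:
--                 positions.append(i)
--                 matched.update(range(i, i + L))
--     return positions
-- ===== Notes on version B (the rewrite author's own statement) =====
-- stated objective: faster
-- what changed: B builds, once per distinct keyword word-count L, an inverted hash index from each joined L-word window to its ascending start positions, so each keyword only visits its own occurrence list instead of re-scanning and re-joining every window of the word list.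
import Mathlib
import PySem

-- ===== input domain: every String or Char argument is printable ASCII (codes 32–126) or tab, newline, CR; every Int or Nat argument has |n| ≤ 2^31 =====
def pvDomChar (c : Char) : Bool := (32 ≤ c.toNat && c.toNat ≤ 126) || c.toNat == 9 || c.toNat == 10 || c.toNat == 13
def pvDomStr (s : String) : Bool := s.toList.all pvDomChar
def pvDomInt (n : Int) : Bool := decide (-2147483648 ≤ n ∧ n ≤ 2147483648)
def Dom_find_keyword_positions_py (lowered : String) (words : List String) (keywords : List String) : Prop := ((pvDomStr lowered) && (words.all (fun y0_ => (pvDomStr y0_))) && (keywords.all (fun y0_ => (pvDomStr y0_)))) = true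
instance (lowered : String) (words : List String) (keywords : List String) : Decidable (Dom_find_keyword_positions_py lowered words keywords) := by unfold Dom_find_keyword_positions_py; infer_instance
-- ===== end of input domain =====

-- B replaces A's per-keyword scan over every start position by a hash index, built once per
-- distinct keyword word-count, from each joined window to its start positions (objective: faster).

-- ===== PORT A =====
def find_keyword_positions_py (lowered : String) (words : List String) (keywords : List String) : List Int :=
  let sorted_keywords := PySem.List.sorted keywords (fun k => ((PySem.Str.split₀ k).length : Int)) true
  (sorted_keywords.foldl (fun (st : List Int × PySem.Set Int) kw =>
      let kw_words := PySem.Str.split₀ kw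
      let kw_len : Int := (kw_words.length : Int)
      (PySem.List.pyRange 0 ((words.length : Int) - kw_len + 1) 1).foldl (fun st i =>
        if PySem.Set.contains st.2 i then st
        else
          let candidate := PySem.Str.join " " (PySem.List.slice words (some i) (some (i + kw_len)))
          if candidate == kw then
            (st.1 ++ [i], (PySem.List.pyRange i (i + kw_len) 1).foldl (fun m j => PySem.Set.add m j) st.2)
          else st) st)
    ([], PySem.Set.empty)).1

-- ===== PORT B =====
def find_keyword_positions_py_alt (lowered : String) (words : List String) (keywords : List String) : List Int :=
  -- index : word-count L ↦ (joined L-word window ↦ ascending start positions)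
  let index : PySem.Dict Int (PySem.Dict String (List Int)) :=
    keywords.foldl (fun index kw =>
      let L : Int := ((PySem.Str.split₀ kw).length : Int)
      if index.contains L then index
      else
        let idx : PySem.Dict String (List Int) :=
          (PySem.List.pyRange 0 ((words.length : Int) - L + 1) 1).foldl
            (fun idx i =>
              idx.modify (PySem.Str.join " " (PySem.List.slice words (some i) (some (i + L)))) [] (· ++ [i]))
            PySem.Dict.empty
        index.insert L idx) PySem.Dict.empty
  ((PySem.List.sorted keywords (fun k => ((PySem.Str.split₀ k).length : Int)) true).foldl
    (fun (st : List Int × PySem.Set Int) kw =>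
      let L : Int := ((PySem.Str.split₀ kw).length : Int)
      -- index[L] : the key L is always present (built above for every keyword's word count)
      ((index.getD L PySem.Dict.empty).getD kw []).foldl (fun st i =>
        if PySem.Set.contains st.2 i then st
        else (st.1 ++ [i], PySem.Set.update st.2 (PySem.List.pyRange i (i + L) 1))) st)
    ([], PySem.Set.empty)).1

-- ===== PRECONDITION & SPEC =====
def Spec_find_keyword_positions_py (lowered : String) (words : List String) (keywords : List String) (out : List Int) : Prop := out = find_keyword_positions_py_alt lowered words keywords
instance (lowered : String) (words : List String) (keywords : List String) (out : List Int) : Decidable (Spec_find_keyword_positions_py lowered words keywords out) := by unfold Spec_find_keyword_positions_py; infer_instance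

-- ===== CLAIM (what is proved, stated in full; the proofs are below) =====
def Claim_equal_find_keyword_positions_py : Prop := ∀ (lowered : String) (words : List String) (keywords : List String), Dom_find_keyword_positions_py lowered words keywords → Spec_find_keyword_positions_py lowered words keywords (find_keyword_positions_py lowered words keywords)

-- ===== LEMMAS AND PROOFS =====

-- the joined L-word window starting at i
def pvCand (words : List String) (L i : Int) : String :=
  PySem.Str.join " " (PySem.List.slice words (some i) (some (i + L)))

-- the per-length index B builds
def pvBuildIdx (words : List String) (L : Int) : PySem.Dict String (List Int) :=
  (PySem.List.pyRange 0 ((words.length : Int) - L + 1) 1).foldl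
    (fun idx i => idx.modify (pvCand words L i) [] (· ++ [i])) PySem.Dict.empty

-- lookup in the per-length index = the filtered position list
theorem pvBuildIdx_getD (words : List String) (L : Int) (kw : String) :
    (pvBuildIdx words L).getD kw []
      = (PySem.List.pyRange 0 ((words.length : Int) - L + 1) 1).filter
          (fun i => pvCand words L i == kw) := by
  have h1 : pvBuildIdx words L
      = List.foldl (fun (d : PySem.Dict String (List Int)) (p : String × Int) => d.modify p.1 [] (· ++ [p.2]))
          PySem.Dict.empty
          ((PySem.List.pyRange 0 ((words.length : Int) - L + 1) 1).map (fun i => (pvCand words L i, i))) := by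
    rw [List.foldl_map]; rfl
  rw [h1, PySem.Dict.getD_foldl_modify_append]
  simp [List.filter_map, Function.comp_def]

-- presence of a key is preserved by B's index-building fold
theorem pvContains_mono (words : List String) (L0 : Int) (t : List String) :
    ∀ (d : PySem.Dict Int (PySem.Dict String (List Int))), d.contains L0 = true →
    (t.foldl (fun index kw =>
      let L : Int := ((PySem.Str.split₀ kw).length : Int)
      if index.contains L then index
      else index.insert L (pvBuildIdx words L)) d).contains L0 = true := by
  induction t with
  | nil => intro d hpres; exact hpres
  | cons a s ihs =>
    intro d hpres
    simp only [List.foldl_cons]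
    by_cases hca : d.contains ((PySem.Str.split₀ a).length : Int) = true
    · rw [if_pos hca]; exact ihs d hpres
    · rw [if_neg hca]
      exact ihs _ (by rw [PySem.Dict.contains_insert]; simp [hpres])

-- invariant of B's index-building loop
theorem pvIndex_inv (words : List String) (ks : List String)
    (d : PySem.Dict Int (PySem.Dict String (List Int)))
    (hd : ∀ L, d.contains L = true → d.getD L PySem.Dict.empty = pvBuildIdx words L) :
    (∀ L, (ks.foldl (fun index kw =>
        let L : Int := ((PySem.Str.split₀ kw).length : Int)
        if index.contains L then index
        else index.insert L (pvBuildIdx words L)) d).contains L = true →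
      (ks.foldl (fun index kw =>
        let L : Int := ((PySem.Str.split₀ kw).length : Int)
        if index.contains L then index
        else index.insert L (pvBuildIdx words L)) d).getD L PySem.Dict.empty = pvBuildIdx words L) ∧
    (∀ kw ∈ ks, (ks.foldl (fun index kw =>
        let L : Int := ((PySem.Str.split₀ kw).length : Int)
        if index.contains L then index
        else index.insert L (pvBuildIdx words L)) d).contains ((PySem.Str.split₀ kw).length : Int) = true) := by
  induction ks generalizing d with
  | nil => exact ⟨hd, by simp⟩
  | cons k t ih =>
    simp only [List.foldl_cons]
    set L0 : Int := ((PySem.Str.split₀ k).length : Int) with hL0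
    by_cases hc : d.contains L0 = true
    · rw [if_pos hc]
      refine ⟨(ih d hd).1, ?_⟩
      intro kw hkw
      rcases List.mem_cons.mp hkw with h | h
      · -- k itself: L0 stays present through the remaining fold
        subst h
        exact pvContains_mono words L0 t d hc
      · exact (ih d hd).2 kw h
    · rw [if_neg hc]
      have hd' : ∀ L, (d.insert L0 (pvBuildIdx words L0)).contains L = true →
          (d.insert L0 (pvBuildIdx words L0)).getD L PySem.Dict.empty = pvBuildIdx words L := by
        intro L hL
        rw [PySem.Dict.getD_insert]
        by_cases hEq : L = L0
        · simp [hEq]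
        · rw [if_neg hEq]
          rw [PySem.Dict.contains_insert] at hL
          simp only [Bool.or_eq_true, beq_iff_eq] at hL
          exact hd L (hL.resolve_left hEq)
      refine ⟨(ih _ hd').1, ?_⟩
      intro kw hkw
      rcases List.mem_cons.mp hkw with h | h
      · subst h
        exact pvContains_mono words L0 t _ (by rw [PySem.Dict.contains_insert]; simp)
      · exact (ih _ hd').2 kw h

-- A's inner scan over all start positions = B's fold over the filtered positions
theorem pvInner_eq (words : List String) (L : Int) (kw : String)
    (l : List Int) (st : List Int × PySem.Set Int) :
    l.foldl (fun st i =>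
        if PySem.Set.contains st.2 i then st
        else
          if pvCand words L i == kw then
            (st.1 ++ [i], (PySem.List.pyRange i (i + L) 1).foldl (fun m j => PySem.Set.add m j) st.2)
          else st) st
      = (l.filter (fun i => pvCand words L i == kw)).foldl (fun st i =>
          if PySem.Set.contains st.2 i then st
          else (st.1 ++ [i], PySem.Set.update st.2 (PySem.List.pyRange i (i + L) 1))) st := by
  rw [← PySem.List.foldl_if_eq_foldl_filter (p := fun i => pvCand words L i == kw)]
  apply PySem.List.foldl_congr_mem
  intro acc x _
  by_cases hm : x ∈ acc.2
  · simp [hm]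
  · by_cases hk : pvCand words L x = kw
    · simp [hm, hk, PySem.Set.update]
    · simp [hm, hk]

-- ===== VERDICT (by name: the statement is the Claim_ definition above) =====
theorem find_keyword_positions_py_spec : Claim_equal_find_keyword_positions_py := by
  intro lowered words keywords _
  show find_keyword_positions_py lowered words keywords
      = find_keyword_positions_py_alt lowered words keywords
  unfold find_keyword_positions_py find_keyword_positions_py_alt
  simp only []
  congr 1
  apply PySem.List.foldl_congr_mem
  intro st kw hkw
  have hkw' : kw ∈ keywords := (PySem.List.mem_sorted _ _ _ _).mp hkw
  have hIdx := pvIndex_inv words keywords PySem.Dict.empty (by intro L h; simp [PySem.Dict.contains, PySem.Dict.empty] at h)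
  have hget : ((keywords.foldl (fun index kw =>
        let L : Int := ((PySem.Str.split₀ kw).length : Int)
        if index.contains L then index
        else index.insert L (pvBuildIdx words L)) PySem.Dict.empty).getD
        ((PySem.Str.split₀ kw).length : Int) PySem.Dict.empty)
      = pvBuildIdx words ((PySem.Str.split₀ kw).length : Int) :=
    hIdx.1 _ (hIdx.2 kw hkw')
  rw [show (fun (index : PySem.Dict Int (PySem.Dict String (List Int))) (kw : String) =>
        if index.contains ((PySem.Str.split₀ kw).length : Int) then index
        else index.insert ((PySem.Str.split₀ kw).length : Int)
          ((PySem.List.pyRange 0 ((words.length : Int) - ((PySem.Str.split₀ kw).length : Int) + 1) 1).foldl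
            (fun idx i =>
              idx.modify (PySem.Str.join " " (PySem.List.slice words (some i) (some (i + ((PySem.Str.split₀ kw).length : Int))))) [] (· ++ [i]))
            PySem.Dict.empty))
      = (fun index kw =>
        if index.contains ((PySem.Str.split₀ kw).length : Int) then index
        else index.insert ((PySem.Str.split₀ kw).length : Int)
          (pvBuildIdx words ((PySem.Str.split₀ kw).length : Int))) from rfl]
  rw [hget, pvBuildIdx_getD]
  exact pvInner_eq words _ kw _ st
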